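-- pv_equiv track=rewrite | github.com/unknown-person00lie/KawaiiGPT | utils/network.py | validate_hostname
-- ===== SOURCE A (Python) =====
-- def validate_hostname(hostname: str) -> bool:
--     if not hostname or len(hostname) > 253:
--         return False
--
--     labels = hostname.split('.')
--     if len(labels) < 2:
--         return False
--
--     for label in labels:
--         if not label or len(label) > 63:
--             return False
--
--     return True
-- ===== SOURCE B (Python) =====
-- def validate_hostname(hostname: str) -> bool:
--     # single left-to-right scan: no intermediate label list is built
--     n = len(hostname)
--     if n == 0 or n > 253:
--         return False
--     cur = 0      # length of the current label
--     dots = 0     # number of '.' seen so far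
--     for ch in hostname:
--         if ch == '.':
--             if cur == 0 or cur > 63:
--                 return False
--             dots += 1
--             cur = 0
--         else:
--             cur += 1
--     return dots >= 1 and 1 <= cur <= 63
-- ===== Notes on version B (the rewrite author's own statement) =====
-- stated objective: alternative
-- what changed: Replaces the split-into-labels-then-loop with a single character scan that tracks the current label length and the dot count, never building a label list.
import Mathlib
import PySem

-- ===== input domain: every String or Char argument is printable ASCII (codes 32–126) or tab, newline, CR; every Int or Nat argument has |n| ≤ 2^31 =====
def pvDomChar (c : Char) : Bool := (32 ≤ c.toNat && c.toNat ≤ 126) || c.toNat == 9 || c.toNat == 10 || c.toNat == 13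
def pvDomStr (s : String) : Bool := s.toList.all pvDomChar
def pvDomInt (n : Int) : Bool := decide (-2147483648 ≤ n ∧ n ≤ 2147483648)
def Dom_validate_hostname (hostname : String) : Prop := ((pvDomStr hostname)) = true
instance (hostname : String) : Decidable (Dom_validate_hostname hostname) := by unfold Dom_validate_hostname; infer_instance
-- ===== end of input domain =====

-- B replaces A's split-into-labels-then-loop by a single character scan carrying (current label length, dot count); alternative decomposition, same cost.


-- ===== PORT A =====
-- the 'for label in labels' loop with its early 'return False'
def checkLabels : List (List Char) → Bool
  | [] => true
  | l :: ls => if l.isEmpty || l.length > 63 then false else checkLabels ls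

def validate_hostname (hostname : String) : Bool :=
  if (hostname == "") || (PySem.Str.len hostname > 253) then false
  else
    let labels := PySem.Chars.splitOn hostname.toList ['.']
    if labels.length < 2 then false
    else checkLabels labels

-- ===== PORT B =====
-- the single for-loop of Source B over the characters, state (cur, dots), early 'return False'
def scanB : List Char → Nat → Nat → Bool
  | [], cur, dots => decide (dots ≥ 1) && decide (1 ≤ cur) && decide (cur ≤ 63)
  | c :: cs, cur, dots =>
    if c = '.' then
      if cur = 0 || cur > 63 then false else scanB cs 0 (dots + 1)
    else scanB cs (cur + 1) dots

def validate_hostname_alt (hostname : String) : Bool :=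
  let n := PySem.Str.len hostname
  if n = 0 || n > 253 then false
  else scanB hostname.toList 0 0

-- ===== PRECONDITION & SPEC =====
def Spec_validate_hostname (hostname : String) (out : Bool) : Prop := out = validate_hostname_alt hostname
instance (hostname : String) (out : Bool) : Decidable (Spec_validate_hostname hostname out) := by unfold Spec_validate_hostname; infer_instance

-- ===== CLAIM (what is proved, stated in full; the proofs are below) =====
def Claim_equal_validate_hostname : Prop := ∀ (hostname : String), Dom_validate_hostname hostname → Spec_validate_hostname hostname (validate_hostname hostname)

-- ===== LEMMAS AND PROOFS =====

def splitDot : List Char → List (List Char)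
  | [] => [[]]
  | ch :: rest =>
    if ch = '.' then [] :: splitDot rest
    else
      match splitDot rest with
      | r :: rs => (ch :: r) :: rs
      | [] => [[ch]]

lemma splitDot_ne_nil (l : List Char) : splitDot l ≠ [] := by
  cases l with
  | nil => simp [splitDot]
  | cons ch rest =>
    simp only [splitDot]
    split
    · simp
    · cases h : splitDot rest <;> simp

def okLen (n : Nat) : Bool := decide (1 ≤ n) && decide (n ≤ 63)

lemma checkLabels_eq (ls : List (List Char)) :
    checkLabels ls = ls.all (fun l => okLen l.length) := by
  induction ls with
  | nil => rfl
  | cons l ls ih =>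
    cases l with
    | nil => simp [checkLabels, okLen]
    | cons x xs =>
      simp only [checkLabels, ih, List.length_cons]
      by_cases h2 : 63 < xs.length + 1
      · rw [if_pos (by simp; omega)]
        have h3 : okLen (xs.length + 1) = false := by simp [okLen]; omega
        simp [h3]
      · rw [if_neg (by simp; omega)]
        have h3 : okLen (xs.length + 1) = true := by simp [okLen]; omega
        simp [h3]

lemma scanB_cons_dot (cs : List Char) (cur dots : Nat) :
    scanB ('.' :: cs) cur dots
      = if cur = 0 || cur > 63 then false else scanB cs 0 (dots + 1) := rfl

lemma scanB_cons_ne (c : Char) (cs : List Char) (cur dots : Nat) (hc : c ≠ '.') :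
    scanB (c :: cs) cur dots = scanB cs (cur + 1) dots := by
  simp [scanB, hc]

lemma scanB_eq (l : List Char) : ∀ (cur dots : Nat),
    scanB l cur dots =
      (decide (2 ≤ dots + (splitDot l).length)
        && okLen (cur + (splitDot l).headI.length)
        && ((splitDot l).tail.all (fun lab => okLen lab.length))) := by
  induction l with
  | nil =>
    intro cur dots
    simp only [scanB, splitDot, okLen, List.length_cons, List.length_nil, List.headI,
      List.tail_cons, List.all_nil, Bool.and_true, Nat.zero_add, Nat.add_zero]
    rw [Bool.and_assoc]
    congr 1
    exact decide_eq_decide.mpr (by omega)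
  | cons ch rest ih =>
    intro cur dots
    rcases hs : splitDot rest with _ | ⟨r, rs⟩
    · exact absurd hs (splitDot_ne_nil rest)
    by_cases hc : ch = '.'
    · subst hc
      have hsp : splitDot ('.' :: rest) = [] :: r :: rs := by
        simp [splitDot, hs]
      rw [hsp, scanB_cons_dot]
      simp only [List.length_cons, List.headI, List.tail_cons, List.all_cons,
        List.length_nil, Nat.add_zero]
      by_cases h0 : cur = 0
      · rw [if_pos (by simp [h0])]
        have h3 : okLen cur = false := by simp [okLen, h0]
        simp [h3]
      · by_cases h63 : 63 < cur
        · rw [if_pos (by simp [h63])]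
          have h3 : okLen cur = false := by simp [okLen]; omega
          simp [h3]
        · rw [if_neg (by simp [h0, h63])]
          have h3 : okLen cur = true := by simp [okLen]; omega
          rw [ih 0 (dots + 1), hs]
          rw [show dots + 1 + ((r :: rs : List (List Char)).length)
                = dots + ((([] : List Char) :: r :: rs : List (List Char)).length) from by
              simp; omega]
          simp [h3, Bool.and_assoc]
    · have hsp : splitDot (ch :: rest) = (ch :: r) :: rs := by
        simp [splitDot, hc, hs]
      rw [hsp, scanB_cons_ne _ _ _ _ hc, ih (cur + 1) dots, hs]
      have e : cur + 1 + r.length = cur + (r.length + 1) := by omega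
      simp only [List.length_cons, List.headI, List.tail_cons, e]
      rfl

lemma splitOn_go_eq (l : List Char) : ∀ (fuel : Nat) (cur : List Char) (acc : List (List Char)),
    l.length < fuel →
    PySem.Chars.splitOn.go ['.'] fuel l cur acc
      = acc.reverse ++ (splitDot l).modifyHead (cur.reverse ++ ·) := by
  induction l with
  | nil =>
    intro fuel cur acc h
    match fuel with
    | fuel + 1 => simp [PySem.Chars.splitOn.go, splitDot]
  | cons ch rest ih =>
    intro fuel cur acc h
    match fuel with
    | fuel + 1 =>
      by_cases hc : ch = '.'
      · subst hc
        rw [show PySem.Chars.splitOn.go ['.'] (fuel+1) ('.' :: rest) cur acc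
              = PySem.Chars.splitOn.go ['.'] fuel rest [] (cur.reverse :: acc) by
            simp [PySem.Chars.splitOn.go, List.isPrefixOf]]
        rw [ih fuel [] (cur.reverse :: acc) (by simpa using h)]
        simp [splitDot]
        cases hs : splitDot rest <;> simp [List.modifyHead]
      · rw [show PySem.Chars.splitOn.go ['.'] (fuel+1) (ch :: rest) cur acc
              = PySem.Chars.splitOn.go ['.'] fuel rest (ch :: cur) acc by
            simp only [PySem.Chars.splitOn.go, List.isPrefixOf, Bool.and_true]
            rw [if_neg (by simp; exact fun hq => hc hq.symm)]]
        rw [ih fuel (ch :: cur) acc (by simpa using h)]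
        simp only [splitDot, if_neg hc]
        rcases hs : splitDot rest with _ | ⟨r, rs⟩
        · exact absurd hs (splitDot_ne_nil rest)
        · simp [List.modifyHead]

lemma splitOn_eq_splitDot (l : List Char) :
    PySem.Chars.splitOn l ['.'] = splitDot l := by
  rw [PySem.Chars.splitOn, splitOn_go_eq l (l.length + 1) [] [] (by omega)]
  cases h : splitDot l <;> simp [List.modifyHead]

lemma empty_iff_len (s : String) : (s == "") = decide (PySem.Str.len s = 0) := by
  by_cases h : s = ""
  · subst h; decide
  · simp [h, PySem.Str.len_eq]

-- ===== VERDICT (by name: the statement is the Claim_ definition above) =====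
theorem validate_hostname_spec : Claim_equal_validate_hostname := by
  intro hostname _
  show validate_hostname hostname = validate_hostname_alt hostname
  unfold validate_hostname validate_hostname_alt
  rw [empty_iff_len]
  show (if (decide (PySem.Str.len hostname = 0) || decide (PySem.Str.len hostname > 253)) = true
          then false
          else if (PySem.Chars.splitOn hostname.toList ['.']).length < 2 then false
            else checkLabels (PySem.Chars.splitOn hostname.toList ['.']))
      = (if (decide (PySem.Str.len hostname = 0) || decide (PySem.Str.len hostname > 253)) = true
          then false
          else scanB hostname.toList 0 0)
  rcases hg : ((decide (PySem.Str.len hostname = 0)) || (decide (PySem.Str.len hostname > 253))) with _ | _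
  · simp only [Bool.false_eq_true, if_false]
    rw [splitOn_eq_splitDot, scanB_eq, checkLabels_eq]
    rcases hs : splitDot hostname.toList with _ | ⟨r, rs⟩
    · exact absurd hs (splitDot_ne_nil _)
    · simp only [List.length_cons, List.headI, List.tail_cons, List.all_cons,
        Nat.zero_add]
      by_cases hr : rs = []
      · subst hr
        rw [if_pos (by simp)]
        simp
      · have hlen : rs.length ≠ 0 := by simpa [List.length_eq_zero_iff] using hr
        rw [if_neg (by omega)]
        simp [Bool.and_assoc]
        exact fun _ _ => by omega
  · simp
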